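-- pv_equiv track=rewrite | github.com/Jasson-01/UBA-IP-2024 | Parciales-Python/Parcial-8/problema_3.py | empleado_del_mes
-- ===== SOURCE A (Python) =====
-- def suma_lista(lista: list[int]) -> int:
--     suma_lista = 0
--     for num in lista:
--         suma_lista += num
--     return suma_lista
--
-- def empleado_del_mes(horas: dict[int, list[int]]) -> list[int]:
--
--     lista_de_tuplas = []
--     for key, valor in horas.items():
--         lista_de_tuplas.append((key, valor))
--
--     lista_maxima = lista_de_tuplas[0][1]
--     for i in lista_de_tuplas:  # Este itera sobre las tuplas
--        #     for j in range(len(lista_de_tuplas)): # Este itera sobre cada tupla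
--         if suma_lista(lista_maxima) <= suma_lista(i[1]):
--             lista_maxima = i[1]
--     return lista_maxima
-- ===== SOURCE B (Python) =====
-- def empleado_del_mes(horas: dict[int, list[int]]) -> list[int]:
--     vals = list(horas.values())
--     mejor = max(map(sum, vals))
--     for v in reversed(vals):
--         if sum(v) == mejor:
--             return v
-- ===== Notes on version B (the rewrite author's own statement) =====
-- stated objective: alternative
-- what changed: B computes the maximum hour sum once with max() and then scans the values from the back for the last list attaining it, instead of A's running-max loop over (key, value) tuples that re-sums the current maximum on every comparison.
import Mathlib
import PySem

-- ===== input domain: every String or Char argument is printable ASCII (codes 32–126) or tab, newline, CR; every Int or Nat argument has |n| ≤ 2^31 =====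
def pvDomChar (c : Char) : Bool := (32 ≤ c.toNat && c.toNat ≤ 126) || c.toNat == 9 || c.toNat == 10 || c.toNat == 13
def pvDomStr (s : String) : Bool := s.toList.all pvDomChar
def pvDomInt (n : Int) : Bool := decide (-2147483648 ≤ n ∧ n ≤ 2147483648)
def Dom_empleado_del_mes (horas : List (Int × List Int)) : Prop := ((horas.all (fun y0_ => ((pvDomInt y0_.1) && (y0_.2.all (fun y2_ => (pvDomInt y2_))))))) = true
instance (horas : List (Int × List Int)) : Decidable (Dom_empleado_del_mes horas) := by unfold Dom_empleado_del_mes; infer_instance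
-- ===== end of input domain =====

-- B computes the maximum hour sum once and then scans the values from the back for the
-- last list attaining it, instead of A's running-max loop that re-sums the current maximum
-- each iteration (objective: alternative; same asymptotic cost).


-- ===== PORT A =====
-- helper suma_lista: a running sum loop
def sumaLista (lista : List Int) : Int :=
  lista.foldl (fun suma num => suma + num) 0

def empleado_del_mes (horas : List (Int × List Int)) : List Int :=
  let d := PySem.Dict.ofList horas          -- marshalling: the Python argument is a dict
  let lista_de_tuplas :=
    d.items.foldl (fun acc kv => acc ++ [kv]) ([] : List (Int × List Int))
  let lista_maxima := (PySem.List.pyGetD lista_de_tuplas 0 (0, [])).2  -- [0] raises on empty: Pre_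
  lista_de_tuplas.foldl
    (fun lista_maxima i =>
      if sumaLista lista_maxima ≤ sumaLista i.2 then i.2 else lista_maxima)
    lista_maxima

-- ===== PORT B =====
def empleado_del_mes_alt (horas : List (Int × List Int)) : List Int :=
  let vals := (PySem.Dict.ofList horas).values   -- marshalling: the Python argument is a dict
  match PySem.List.max? (vals.map List.sum) (fun x => x) with
  | none => []                                   -- max() of empty raises ValueError: Pre_
  | some mejor => ((vals.reverse.find? (fun v => v.sum == mejor)).getD [])

-- ===== PRECONDITION & SPEC =====
-- A raises IndexError (and B's max() ValueError) on the empty dict; Pre_ excludes only that.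
def Pre_empleado_del_mes (horas : List (Int × List Int)) : Prop := horas ≠ []
instance (horas : List (Int × List Int)) : Decidable (Pre_empleado_del_mes horas) := by
  unfold Pre_empleado_del_mes; infer_instance

def pvWitness_empleado_del_mes : (List (Int × List Int)) := ([(1, [2, 3])])

def Spec_empleado_del_mes (horas : List (Int × List Int)) (out : List Int) : Prop := out = empleado_del_mes_alt horas
instance (horas : List (Int × List Int)) (out : List Int) : Decidable (Spec_empleado_del_mes horas out) := by unfold Spec_empleado_del_mes; infer_instance

-- ===== CLAIM (what is proved, stated in full; the proofs are below) =====
def Claim_equal_empleado_del_mes : Prop := ∀ (horas : List (Int × List Int)), Dom_empleado_del_mes horas → Pre_empleado_del_mes horas → Spec_empleado_del_mes horas (empleado_del_mes horas)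

-- ===== LEMMAS AND PROOFS =====

-- suma_lista is sum
lemma sumaLista_eq_sum (l : List Int) : sumaLista l = l.sum := by
  simpa [sumaLista] using PySem.List.foldl_add (g := fun x : Int => x) (l := l) (a := 0)

-- the running max of sums, starting from a
def maxS (vs : List (List Int)) (a : Int) : Int :=
  vs.foldl (fun m v => max m v.sum) a

-- A's loop body, after sumaLista_eq_sum
def fA (m v : List Int) : List Int := if m.sum ≤ v.sum then v else m

lemma sum_foldl_fA (vs : List (List Int)) : ∀ a, (vs.foldl fA a).sum = maxS vs a.sum := by
  induction vs with
  | nil => intro a; simp [maxS]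
  | cons v t ih =>
      intro a
      simp only [List.foldl_cons, maxS] at *
      rw [ih]
      have hfa : (fA a v).sum = max a.sum v.sum := by
        simp only [fA]; split_ifs with h <;> omega
      rw [hfa]

lemma maxS_attained (vs : List (List Int)) : ∀ a : Int, maxS vs a = a ∨ ∃ v ∈ vs, maxS vs a = v.sum := by
  induction vs with
  | nil => intro a; left; rfl
  | cons v t ih =>
      intro a
      simp only [maxS, List.foldl_cons] at *
      rcases ih (max a v.sum) with h | ⟨w, hw, h⟩
      · rcases max_choice a v.sum with hm | hm
        · left; rw [h, hm]
        · right; exact ⟨v, List.mem_cons_self, by rw [h, hm]⟩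
      · right; exact ⟨w, List.mem_cons_of_mem _ hw, h⟩

-- A's fold equals "last element whose sum equals the running max", default acc
lemma foldl_fA_eq_find (vs : List (List Int)) :
    ∀ a, vs.foldl fA a = (vs.reverse.find? (fun v => v.sum == maxS vs a.sum)).getD a := by
  induction vs using List.reverseRecOn with
  | nil => intro a; simp
  | append_singleton l x ih =>
      intro a
      rw [List.foldl_append]
      have hmax : maxS (l ++ [x]) a.sum = max (maxS l a.sum) x.sum := by
        simp [maxS, List.foldl_append]
      rw [List.reverse_append, List.reverse_singleton, List.singleton_append]
      by_cases h : maxS l a.sum ≤ x.sum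
      · have h1 : (l.foldl fA a).sum ≤ x.sum := by rw [sum_foldl_fA]; exact h
        have hx : (x.sum == maxS (l ++ [x]) a.sum) = true := by
          rw [hmax]; simp; omega
        rw [List.find?_cons_of_pos (p := fun (v : List Int) => v.sum == maxS (l ++ [x]) a.sum) hx]
        simp [fA, h1]
      · have h1 : ¬ (l.foldl fA a).sum ≤ x.sum := by rw [sum_foldl_fA]; exact h
        have h2 : maxS (l ++ [x]) a.sum = maxS l a.sum := by rw [hmax]; omega
        have hx : ¬ (x.sum == maxS (l ++ [x]) a.sum) = true := by
          rw [h2]; simp; omega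
        rw [List.find?_cons_of_neg (p := fun (v : List Int) => v.sum == maxS (l ++ [x]) a.sum) hx, h2]
        simp only [List.foldl_cons, List.foldl_nil, fA, if_neg h1]
        exact ih a

-- values of the marshalled dict are nonempty when the input list is
lemma values_ofList_ne_nil (horas : List (Int × List Int)) (h : horas ≠ []) :
    (PySem.Dict.ofList horas).values ≠ [] := by
  intro hv
  have hk : (PySem.Dict.ofList horas).keys = PySem.Set.ofList (horas.map (·.1)) := by
    have := PySem.Dict.keys_foldl_insert_key (ν := List Int) horas (fun p => p.1)
      (fun _ p => p.2) PySem.Dict.empty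
    simpa [PySem.Dict.ofList, PySem.Dict.update, PySem.Set.update_nil_left] using this
  obtain ⟨p, t, rfl⟩ := List.exists_cons_of_ne_nil h
  have : p.1 ∈ (PySem.Dict.ofList (p :: t)).keys := by
    rw [hk]; rw [PySem.Set.mem_ofList]; simp
  have hk0 : (PySem.Dict.ofList (p :: t)).keys ≠ [] := by
    intro h0; rw [h0] at this; exact (List.not_mem_nil) this
  apply hk0
  have : (PySem.Dict.ofList (p :: t)).items = [] := by
    have := congrArg List.length hv
    simpa [PySem.Dict.values] using this
  simp [PySem.Dict.keys, this]

-- ===== VERDICT (by name: the statement is the Claim_ definition above) =====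
theorem empleado_del_mes_spec : Claim_equal_empleado_del_mes := by
  intro horas _ hpre
  unfold Spec_empleado_del_mes empleado_del_mes empleado_del_mes_alt
  have hvals := values_ofList_ne_nil horas hpre
  obtain ⟨v0, vt, hv⟩ := List.exists_cons_of_ne_nil hvals
  simp only [PySem.List.foldl_append_singleton_eq_self, List.nil_append]
  -- A's fold over the items is a fold over the values
  have hA : (PySem.Dict.ofList horas).items.foldl
      (fun m i => if sumaLista m ≤ sumaLista i.2 then i.2 else m)
      (PySem.List.pyGetD (PySem.Dict.ofList horas).items 0 (0, [])).2
      = vt.foldl fA v0 := by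
    have hmap : ((PySem.Dict.ofList horas).items.map (·.2)) = (PySem.Dict.ofList horas).values := rfl
    have h0 : (PySem.List.pyGetD (PySem.Dict.ofList horas).items 0 (0, [])).2 = v0 := by
      obtain ⟨q, it, hq⟩ := List.exists_cons_of_ne_nil
        (show (PySem.Dict.ofList horas).items ≠ [] by
          intro h0; apply hvals; simp [PySem.Dict.values, h0])
      have : (PySem.Dict.ofList horas).values = q.2 :: it.map (·.2) := by
        simp [PySem.Dict.values, hq]
      rw [this] at hv
      have hcv := (List.cons.injEq _ _ _ _).mp hv
      simp [hq, PySem.List.pyGetD, PySem.List.pyGet?, PySem.List.pyIdx?, hcv.1]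
    rw [h0]
    calc (PySem.Dict.ofList horas).items.foldl
          (fun m i => if sumaLista m ≤ sumaLista i.2 then i.2 else m) v0
        = ((PySem.Dict.ofList horas).items.map (·.2)).foldl fA v0 := by
          rw [List.foldl_map]; simp only [fA, sumaLista_eq_sum]
      _ = vt.foldl fA v0 := by
          rw [hmap, hv, List.foldl_cons]
          simp [fA]
  rw [hA, hv]
  -- B's max? on the nonempty sums list
  rw [show (v0 :: vt).map List.sum = v0.sum :: vt.map List.sum from rfl,
    PySem.List.max?_id_cons]
  have hmejor : (vt.map List.sum).foldl max v0.sum = maxS vt v0.sum := by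
    rw [List.foldl_map]; rfl
  rw [hmejor]
  show vt.foldl fA v0
      = (((v0 :: vt).reverse).find? (fun v => v.sum == maxS vt v0.sum)).getD []
  rw [foldl_fA_eq_find]
  rw [show (v0 :: vt).reverse = vt.reverse ++ [v0] by simp]
  rw [List.find?_append]
  cases hf : vt.reverse.find? (fun v => v.sum == maxS vt v0.sum) with
  | some w => simp
  | none =>
      -- nothing in vt attains the max, so it is v0.sum and the appended v0 matches
      have hnone : ∀ v ∈ vt, ¬ (v.sum == maxS vt v0.sum) = true := by
        intro v hv' hp
        have : (vt.reverse.find? (fun v => v.sum == maxS vt v0.sum)).isSome = true :=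
          List.find?_isSome.mpr ⟨v, List.mem_reverse.mpr hv', hp⟩
        rw [hf] at this; exact Bool.noConfusion this
      have hmax : maxS vt v0.sum = v0.sum := by
        rcases maxS_attained vt v0.sum with h | ⟨w, hw, h⟩
        · exact h
        · exact absurd (by simp [h]) (hnone w hw)
      simp [hmax]
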